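-- pv_equiv track=rewrite | github.com/hae-on/TIL | Baekjoon/한수_1065.py | check
-- ===== SOURCE A (Python) =====
-- def check(N):
--     han = 0
--     for i in range(1, N+1):
--         N_list = list(map(int, str(i)))
--         if i < 100:
--             han += 1
--         elif N_list[0] - N_list[1] == N_list[1] - N_list[2]:
--             han += 1
--     return han
-- ===== SOURCE B (Python) =====
-- def _qual(q):
--     return q // 100 - q // 10 % 10 == q // 10 % 10 - q % 10
--
--
-- def check(N):
--     if N < 100:
--         return N if N > 0 else 0
--     p, base = N, 1
--     while p >= 1000:
--         p //= 10
--         base *= 10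
--     total = 99
--     d = base
--     while d > 1:
--         d //= 10
--         total += 45 * d
--     for q in range(100, p):
--         if _qual(q):
--             total += base
--     if _qual(p):
--         total += N - p * base + 1
--     return total
-- ===== Notes on version B (the rewrite author's own statement) =====
-- stated objective: faster
-- what changed: A scans every number up to N and string-parses its digits; B counts in closed form: a constant for the one- and two-digit numbers, a fixed count of qualifying three-digit prefixes per full digit-length block, plus one bounded scan of the three-digit prefixes for the top block, so the per-number loop disappears.
import Mathlib
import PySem

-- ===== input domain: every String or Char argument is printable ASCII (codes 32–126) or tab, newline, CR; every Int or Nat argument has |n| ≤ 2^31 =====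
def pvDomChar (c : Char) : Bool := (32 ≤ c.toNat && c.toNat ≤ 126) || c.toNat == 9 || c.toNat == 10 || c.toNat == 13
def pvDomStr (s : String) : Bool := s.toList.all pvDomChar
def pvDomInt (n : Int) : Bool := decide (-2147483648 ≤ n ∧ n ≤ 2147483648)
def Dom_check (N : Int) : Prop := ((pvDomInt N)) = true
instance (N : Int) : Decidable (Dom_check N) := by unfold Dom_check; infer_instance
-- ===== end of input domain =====

-- B replaces A's per-number digit-string scan of 1..N by a closed-form count over the ≤ 900
-- three-digit prefixes (objective: faster, O(N·d) → O(1)-bounded work).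

-- ===== PORT A =====
-- A's loop body; `int(c)` is applied only to decimal-digit chars of str(i) (never raises) so
-- `.getD 0` is never taken, and N_list[0..2] is read only when i ≥ 100, where len(N_list) ≥ 3,
-- so pyGetD's default is never taken either.
def check (N : Int) : Int :=
  (PySem.List.pyRange 1 (N + 1)).foldl
    (fun han i =>
      let N_list : List Int := (PySem.Int.toChars i).map (fun c => (PySem.Int.ofChars? [c]).getD 0)
      if i < 100 then han + 1
      else if PySem.List.pyGetD N_list 0 0 - PySem.List.pyGetD N_list 1 0 ==
              PySem.List.pyGetD N_list 1 0 - PySem.List.pyGetD N_list 2 0 then han + 1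
      else han)
    0

-- ===== PORT B =====
-- port of Source B's _qual
def pvQual (q : Int) : Bool :=
  PySem.Int.floordiv q 100 - PySem.Int.mod (PySem.Int.floordiv q 10) 10 ==
    PySem.Int.mod (PySem.Int.floordiv q 10) 10 - PySem.Int.mod q 10

-- port of Source B's first while loop (p //= 10; base *= 10 until p < 1000)
def pvPB (p base : Int) : Int × Int :=
  if 1000 ≤ p then pvPB (PySem.Int.floordiv p 10) (base * 10) else (p, base)
termination_by p.toNat
decreasing_by
  rename_i h
  rw [PySem.Int.floordiv_eq_ediv_of_pos (by omega : (0:Int) < 10)]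
  omega

-- port of Source B's second while loop (d //= 10; total += 45*d until d ≤ 1)
def pvGeo (total d : Int) : Int :=
  if 1 < d then pvGeo (total + 45 * PySem.Int.floordiv d 10) (PySem.Int.floordiv d 10) else total
termination_by d.toNat
decreasing_by
  rename_i h
  rw [PySem.Int.floordiv_eq_ediv_of_pos (by omega : (0:Int) < 10)]
  omega

def check_alt (N : Int) : Int :=
  if N < 100 then (if 0 < N then N else 0)
  else
    let pb := pvPB N 1
    let p := pb.1
    let base := pb.2
    let t1 := pvGeo 99 base
    let t2 := (PySem.List.pyRange 100 p).foldl (fun t q => if pvQual q then t + base else t) t1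
    if pvQual p then t2 + (N - p * base + 1) else t2

-- ===== PRECONDITION & SPEC =====
def Spec_check (N : Int) (out : Int) : Prop := out = check_alt N
instance (N : Int) (out : Int) : Decidable (Spec_check N out) := by unfold Spec_check; infer_instance

-- ===== CLAIM (what is proved, stated in full; the proofs are below) =====
def Claim_equal_check : Prop := ∀ (N : Int), Dom_check N → Spec_check N (check N)

-- ===== LEMMAS AND PROOFS =====

-- A's per-element test, named (definitionally equal to the test inlined in `check`)
def condA (i : Int) : Bool :=
  let N_list : List Int := (PySem.Int.toChars i).map (fun c => (PySem.Int.ofChars? [c]).getD 0)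
  PySem.List.pyGetD N_list 0 0 - PySem.List.pyGetD N_list 1 0 ==
    PySem.List.pyGetD N_list 1 0 - PySem.List.pyGetD N_list 2 0

def stepA (han i : Int) : Int :=
  if i < 100 then han + 1 else if condA i then han + 1 else han

lemma check_eq_stepA (N : Int) : check N = (PySem.List.pyRange 1 (N + 1)).foldl stepA 0 := rfl

-- big-endian decimal digits of a natural number (the value `Nat.toDigits 10` computes)
def pvDigits (n : Nat) : List Char :=
  if n < 10 then [Nat.digitChar n] else pvDigits (n / 10) ++ [Nat.digitChar (n % 10)]
termination_by n
decreasing_by omega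

lemma toDigitsCore_eq : ∀ (f n : Nat) (l : List Char), n < f →
    Nat.toDigitsCore 10 f n l = pvDigits n ++ l := by
  intro f
  induction f with
  | zero => intro n l h; omega
  | succ f ih =>
    intro n l h
    rw [Nat.toDigitsCore]
    by_cases h10 : n / 10 = 0
    · have hn : n < 10 := by omega
      simp only [h10]
      rw [pvDigits, if_pos hn, Nat.mod_eq_of_lt hn]
      rfl
    · have hlt : n / 10 < f := by
        have h2 : n / 10 < n := Nat.div_lt_self (by omega) (by norm_num)
        omega
      rw [if_neg h10, ih _ _ hlt]
      conv_rhs => rw [pvDigits, if_neg (by omega)]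
      simp

lemma toChars_nat (n : Nat) : PySem.Int.toChars (n : Int) = pvDigits n := by
  rw [PySem.Int.toChars]
  rw [if_neg (by omega)]
  have : ((n : Int)).toNat = n := by omega
  rw [this, Nat.toDigits, toDigitsCore_eq _ _ _ (by omega), List.append_nil]

lemma pvDigits_three (n : Nat) (h1 : 100 ≤ n) (h2 : n < 1000) :
    pvDigits n = [Nat.digitChar (n / 100), Nat.digitChar (n / 10 % 10), Nat.digitChar (n % 10)] := by
  rw [pvDigits, if_neg (by omega)]
  rw [pvDigits, if_neg (by omega)]
  rw [pvDigits, if_pos (by omega)]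
  rw [Nat.div_div_eq_div_mul]
  norm_num

lemma pvDigits_length_ge : ∀ (k n : Nat), 10 ^ k ≤ n → k + 1 ≤ (pvDigits n).length := by
  intro k
  induction k with
  | zero =>
    intro n _
    rw [pvDigits]
    split <;> simp
  | succ k ih =>
    intro n hn
    have h10 : 10 ≤ n := le_trans (by calc (10:Nat) = 10^1 := by norm_num
      _ ≤ 10 ^ (k+1) := Nat.pow_le_pow_right (by norm_num) (by omega)) hn
    rw [pvDigits, if_neg (by omega)]
    have : 10 ^ k ≤ n / 10 := by
      rw [Nat.le_div_iff_mul_le (by norm_num)]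
      calc 10 ^ k * 10 = 10 ^ (k+1) := by ring
        _ ≤ n := hn
    have := ih _ this
    simp only [List.length_append, List.length_cons, List.length_nil]
    omega

lemma pvDigits_take3 : ∀ (k n : Nat), 10 ^ (k + 2) ≤ n → n < 10 ^ (k + 3) →
    (pvDigits n).take 3 = pvDigits (n / 10 ^ k) := by
  intro k
  induction k with
  | zero =>
    intro n h1 h2
    norm_num at h1 h2 ⊢
    rw [pvDigits_three n h1 h2]
    rfl
  | succ k ih =>
    intro n h1 h2
    have hp1 : (10:Nat) ^ (k + 1 + 2) = 10 * 10 ^ (k + 2) := by ring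
    have hp2 : (10:Nat) ^ (k + 1 + 3) = 10 * 10 ^ (k + 3) := by ring
    have h10 : 10 ≤ n := by
      have : (10:Nat) ≤ 10 ^ (k+1+2) := by
        calc (10:Nat) = 10^1 := by norm_num
          _ ≤ 10 ^ (k+1+2) := Nat.pow_le_pow_right (by norm_num) (by omega)
      omega
    rw [pvDigits, if_neg (by omega)]
    have hd1 : 10 ^ (k + 2) ≤ n / 10 := by
      rw [Nat.le_div_iff_mul_le (by norm_num)]; omega
    have hd2 : n / 10 < 10 ^ (k + 3) := by
      rw [Nat.div_lt_iff_lt_mul (by norm_num)]; omega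
    have hlen : 3 ≤ (pvDigits (n / 10)).length := by
      have := pvDigits_length_ge (k + 2) (n / 10) hd1
      omega
    rw [List.take_append_of_le_length hlen, ih _ hd1 hd2]
    congr 1
    rw [Nat.div_div_eq_div_mul]
    congr 1
    ring

lemma digit_parse : ∀ d : Nat, d < 10 → (PySem.Int.ofChars? [Nat.digitChar d]).getD 0 = (d : Int) := by
  decide

lemma pvQual_nat (p : Nat) : pvQual (p : Int) =
    (((p / 100 : Nat) : Int) - ((p / 10 % 10 : Nat) : Int) ==
      ((p / 10 % 10 : Nat) : Int) - ((p % 10 : Nat) : Int)) := by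
  unfold pvQual
  have h100 : PySem.Int.floordiv (p : Int) 100 = ((p / 100 : Nat) : Int) := by
    exact_mod_cast PySem.Int.floordiv_natCast p 100
  have h10 : PySem.Int.floordiv (p : Int) 10 = ((p / 10 : Nat) : Int) := by
    exact_mod_cast PySem.Int.floordiv_natCast p 10
  have hm : PySem.Int.mod ((p / 10 : Nat) : Int) 10 = ((p / 10 % 10 : Nat) : Int) := by
    exact_mod_cast PySem.Int.mod_natCast (p / 10) 10
  have hm2 : PySem.Int.mod (p : Int) 10 = ((p % 10 : Nat) : Int) := by
    exact_mod_cast PySem.Int.mod_natCast p 10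
  rw [h100, h10, hm, hm2]

lemma condA_eq (k n : Nat) (h1 : 10 ^ (k + 2) ≤ n) (h2 : n < 10 ^ (k + 3)) :
    condA (n : Int) = pvQual ((n / 10 ^ k : Nat) : Int) := by
  have hp100 : 100 ≤ n / 10 ^ k := by
    rw [Nat.le_div_iff_mul_le (by positivity)]
    calc 100 * 10 ^ k = 10 ^ (k + 2) := by ring
      _ ≤ n := h1
  have hp1000 : n / 10 ^ k < 1000 := by
    rw [Nat.div_lt_iff_lt_mul (by positivity)]
    calc n < 10 ^ (k + 3) := h2
      _ = 1000 * 10 ^ k := by ring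
  set p := n / 10 ^ k with hp
  have hlen : 3 ≤ (pvDigits n).length := by
    have := pvDigits_length_ge (k + 2) n h1
    omega
  have htake : (pvDigits n).take 3 = [Nat.digitChar (p / 100), Nat.digitChar (p / 10 % 10),
      Nat.digitChar (p % 10)] := by
    rw [pvDigits_take3 k n h1 h2, ← hp, pvDigits_three p hp100 hp1000]
  -- elementwise: (pvDigits n)[j] = (take 3)[j]
  have hget : ∀ j : Nat, (hj : j < 3) → (pvDigits n).getD j ' ' =
      [Nat.digitChar (p / 100), Nat.digitChar (p / 10 % 10), Nat.digitChar (p % 10)].getD j ' ' := by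
    intro j hj
    rw [← htake]
    rw [List.getD_eq_getElem _ _ (by omega), List.getD_eq_getElem _ _ (by simp [List.length_take]; omega)]
    rw [List.getElem_take]
  unfold condA
  rw [toChars_nat]
  simp only [PySem.List.pyGetD_ofNat']
  have hmap : ∀ j : Nat, j < 3 →
      ((pvDigits n).map (fun c => (PySem.Int.ofChars? [c]).getD 0)).getD j 0 =
        (PySem.Int.ofChars? [(pvDigits n).getD j ' ']).getD 0 := by
    intro j hj
    rw [List.getD_eq_getElem _ _ (by simp; omega), List.getD_eq_getElem _ _ (by omega)]
    simp
  rw [hmap 0 (by norm_num), hmap 1 (by norm_num), hmap 2 (by norm_num)]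
  rw [hget 0 (by norm_num), hget 1 (by norm_num), hget 2 (by norm_num)]
  simp only [List.getD]
  show ((PySem.Int.ofChars? [Nat.digitChar (p / 100)]).getD 0 -
      (PySem.Int.ofChars? [Nat.digitChar (p / 10 % 10)]).getD 0 ==
      (PySem.Int.ofChars? [Nat.digitChar (p / 10 % 10)]).getD 0 -
      (PySem.Int.ofChars? [Nat.digitChar (p % 10)]).getD 0) = pvQual (p : Int)
  rw [digit_parse _ (by omega), digit_parse _ (by omega), digit_parse _ (by omega), pvQual_nat]

-- ---- B-side characterisation ----
def geoSum : Nat → Int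
  | 0 => 0
  | k + 1 => geoSum k + 10 ^ k

def cnt (p : Int) : Int := ((PySem.List.pyRange 100 p).countP pvQual : Int)

lemma pvPB_eq : ∀ (k : Nat) (n : Nat) (base : Int), 10 ^ (k + 2) ≤ n → n < 10 ^ (k + 3) →
    pvPB (n : Int) base = (((n / 10 ^ k : Nat) : Int), base * 10 ^ k) := by
  intro k
  induction k with
  | zero =>
    intro n base h1 h2
    norm_num at h1 h2
    rw [pvPB, if_neg (by exact_mod_cast not_le.mpr (by exact_mod_cast h2))]
    simp
  | succ k ih =>
    intro n base h1 h2
    have hp1 : (10:Nat) ^ (k + 1 + 2) = 10 * 10 ^ (k + 2) := by ring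
    have hp2 : (10:Nat) ^ (k + 1 + 3) = 10 * 10 ^ (k + 3) := by ring
    have hge : (1000:Nat) ≤ n := by
      have : (1000:Nat) = 10 ^ 3 := by norm_num
      have h3 : (10:Nat) ^ 3 ≤ 10 ^ (k + 1 + 2) := Nat.pow_le_pow_right (by norm_num) (by omega)
      omega
    rw [pvPB, if_pos (by exact_mod_cast hge)]
    have hfd : PySem.Int.floordiv (n : Int) 10 = ((n / 10 : Nat) : Int) := by
      exact_mod_cast PySem.Int.floordiv_natCast n 10
    rw [hfd]
    have hd1 : 10 ^ (k + 2) ≤ n / 10 := by rw [Nat.le_div_iff_mul_le (by norm_num)]; omega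
    have hd2 : n / 10 < 10 ^ (k + 3) := by rw [Nat.div_lt_iff_lt_mul (by norm_num)]; omega
    rw [ih _ _ hd1 hd2]
    rw [Nat.div_div_eq_div_mul]
    have : 10 * 10 ^ k = 10 ^ (k + 1) := by ring
    rw [this]
    have : base * 10 * 10 ^ k = base * 10 ^ (k + 1) := by ring
    rw [this]

lemma pvGeo_eq : ∀ (k : Nat) (t : Int), pvGeo t ((10 : Int) ^ k) = t + 45 * geoSum k := by
  intro k
  induction k with
  | zero => intro t; rw [pvGeo, if_neg (by norm_num)]; simp [geoSum]
  | succ k ih =>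
    intro t
    have hgt : (1 : Int) < 10 ^ (k + 1) := by
      calc (1:Int) < 10 ^ 1 := by norm_num
        _ ≤ 10 ^ (k + 1) := by
          apply pow_le_pow_right₀ (by norm_num) (by omega)
    rw [pvGeo, if_pos hgt]
    have hfd : PySem.Int.floordiv ((10:Int) ^ (k + 1)) 10 = 10 ^ k := by
      rw [PySem.Int.floordiv_eq_ediv_of_pos (by norm_num)]
      rw [pow_succ]
      exact Int.mul_ediv_cancel _ (by norm_num)
    rw [hfd, ih]
    show t + 45 * 10 ^ k + 45 * geoSum k = t + 45 * geoSum (k + 1)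
    rw [geoSum]
    ring

lemma fold_base (base : Int) : ∀ (l : List Int) (t : Int),
    l.foldl (fun t q => if pvQual q then t + base else t) t = t + base * (l.countP pvQual : Int) := by
  intro l
  induction l with
  | nil => intro t; simp
  | cons a l ih =>
    intro t
    by_cases h : pvQual a
    · simp only [List.foldl_cons, List.countP_cons, h, if_pos]
      rw [ih]
      push_cast
      ring
    · simp only [List.foldl_cons, List.countP_cons, h, if_false, Bool.false_eq_true]
      rw [ih]
      simp

lemma cnt_succ (p : Int) (h : 100 ≤ p) : cnt (p + 1) = cnt p + (if pvQual p then 1 else 0) := by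
  unfold cnt
  rw [PySem.List.pyRange_one_succ_right h, List.countP_append]
  by_cases hq : pvQual p <;> simp [hq]

set_option maxRecDepth 40000 in
lemma cnt_999 : cnt 999 = 44 := by decide

lemma cnt_100 : cnt 100 = 0 := by decide

lemma pvQual_100 : pvQual 100 = false := by decide

lemma pvQual_999 : pvQual 999 = true := by decide

lemma alt_closed (k n : Nat) (h1 : 10 ^ (k + 2) ≤ n) (h2 : n < 10 ^ (k + 3)) :
    check_alt (n : Int) = 99 + 45 * geoSum k + (10 : Int) ^ k * cnt ((n / 10 ^ k : Nat) : Int) +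
      (if pvQual ((n / 10 ^ k : Nat) : Int) then (n : Int) - ((n / 10 ^ k : Nat) : Int) * 10 ^ k + 1 else 0) := by
  have h100 : (100 : Nat) ≤ n := by
    have : (100:Nat) = 10 ^ 2 := by norm_num
    have h3 : (10:Nat) ^ 2 ≤ 10 ^ (k + 2) := Nat.pow_le_pow_right (by norm_num) (by omega)
    omega
  unfold check_alt
  rw [if_neg (by exact_mod_cast not_lt.mpr (by exact_mod_cast h100))]
  simp only
  rw [pvPB_eq k n 1 h1 h2]
  simp only [one_mul]
  rw [pvGeo_eq, fold_base]
  show (if pvQual _ then _ else _) = _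
  unfold cnt
  by_cases hq : pvQual ((n / 10 ^ k : Nat) : Int) <;> simp only [hq] <;> simp

lemma alt_step (k n : Nat) (h1 : 10 ^ (k + 2) ≤ n) (h2 : n < 10 ^ (k + 3)) (h100 : 100 < n) :
    check_alt (n : Int) = check_alt ((n - 1 : Nat) : Int) +
      (if pvQual ((n / 10 ^ k : Nat) : Int) then 1 else 0) := by
  have hak : (0:Nat) < 10 ^ k := by positivity
  rw [alt_closed k n h1 h2]
  by_cases hb : n = 10 ^ (k + 2)
  · -- power-of-ten boundary: the digit count drops by one
    obtain ⟨k', rfl⟩ : ∃ k', k = k' + 1 := by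
      cases k with
      | zero => exfalso; rw [hb] at h100; norm_num at h100
      | succ k' => exact ⟨k', rfl⟩
    have e1 : (10:Nat) ^ (k' + 1 + 2) = 1000 * 10 ^ k' := by ring
    have e2 : (10:Nat) ^ (k' + 1 + 2) = 100 * 10 ^ (k' + 1) := by ring
    have hq1 : n / 10 ^ (k' + 1) = 100 :=
      Nat.div_eq_of_lt_le (by omega) (by omega)
    have hd1 : 10 ^ (k' + 2) ≤ n - 1 := by
      have : (10:Nat) ^ (k' + 2) * 10 = 10 ^ (k' + 1 + 2) := by ring
      have h10 : (0:Nat) < 10 ^ (k' + 2) := by positivity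
      omega
    have hd2 : n - 1 < 10 ^ (k' + 3) := by
      have : (10:Nat) ^ (k' + 3) = 10 ^ (k' + 1 + 2) := by ring
      omega
    rw [alt_closed k' (n - 1) hd1 hd2]
    have hq2 : (n - 1) / 10 ^ k' = 999 := by
      apply Nat.div_eq_of_lt_le
      · have h10 : (0:Nat) < 10 ^ k' := by positivity
        omega
      · have : (1000:Nat) * 10 ^ k' = 10 ^ (k' + 1 + 2) := by ring
        omega
    rw [hq1, hq2]
    have hcast : ((n - 1 : Nat) : Int) = (n : Int) - 1 := by omega
    have hn : (n : Int) = 1000 * 10 ^ k' := by exact_mod_cast congrArg (Nat.cast : Nat → Int) (hb.trans e1)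
    rw [hcast, hn, geoSum]
    norm_num [cnt_100, cnt_999, pvQual_100, pvQual_999]
    ring
  · -- same digit count for n-1
    have hd1 : 10 ^ (k + 2) ≤ n - 1 := by omega
    have hd2 : n - 1 < 10 ^ (k + 3) := by omega
    rw [alt_closed k (n - 1) hd1 hd2]
    set a : Nat := 10 ^ k with ha
    set p : Nat := n / a with hp
    have hnda : a * p + n % a = n := by rw [hp]; exact Nat.div_add_mod n a
    have hra : n % a < a := Nat.mod_lt _ hak
    have hp100 : 100 ≤ p := by
      rw [hp, Nat.le_div_iff_mul_le hak]
      calc 100 * a = 10 ^ (k + 2) := by rw [ha]; ring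
        _ ≤ n := h1
    by_cases hr : n % a = 0
    · -- n = p * a : prefix decreases by one
      have hp101 : 101 ≤ p := by
        rcases Nat.lt_or_ge p 101 with h | h
        · exfalso
          have hpv : p = 100 := by omega
          apply hb
          have h' : a * p + n % a = n := hnda
          rw [hr, hpv] at h'
          have he : (10:Nat) ^ (k + 2) = 100 * a := by rw [ha]; ring
          omega
        · exact h
      have hcm : p * a = a * p := Nat.mul_comm _ _
      have hsm : (p - 1) * a + 1 * a = p * a := by
        rw [← Nat.add_mul]
        congr 1
        omega
      have hq2 : (n - 1) / a = p - 1 := by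
        apply Nat.div_eq_of_lt_le
        · omega
        · have : (p - 1 + 1) * a = p * a := by congr 1; omega
          omega
      rw [hq2]
      have hcnt : cnt ((p : Nat) : Int) = cnt (((p - 1 : Nat) : Nat) : Int) + (if pvQual (((p - 1:Nat) : Nat) : Int) then 1 else 0) := by
        have h1p : ((p : Nat) : Int) = (((p - 1 : Nat) : Nat) : Int) + 1 := by omega
        rw [h1p, cnt_succ _ (by omega)]
      rw [hcnt]
      have hc1 : ((n - 1 : Nat) : Int) = (n : Int) - 1 := by omega
      have hc2 : ((p - 1 : Nat) : Int) = ((p:Nat) : Int) - 1 := by omega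
      have hc3 : (n : Int) = ((a : Nat) : Int) * ((p:Nat) : Int) := by
        have h' : a * p + n % a = n := hnda
        rw [hr] at h'
        exact_mod_cast congrArg (Nat.cast : Nat → Int) h'.symm
      have haInt : ((a : Nat) : Int) = (10:Int) ^ k := by rw [ha]; push_cast; ring
      rw [hc1, hc2]
      rw [hc3, ← haInt]
      by_cases q1 : pvQual ((p:Nat) : Int) <;>
        by_cases q2 : pvQual (((p:Nat) : Int) - 1) <;>
          simp only [q1, q2, Bool.false_eq_true, if_true, if_false] <;> ring
    · -- prefix unchanged
      have hcm : p * a = a * p := Nat.mul_comm _ _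
      have hq2 : (n - 1) / a = p := by
        apply Nat.div_eq_of_lt_le
        · omega
        · have : (p + 1) * a = p * a + a := by ring
          omega
      rw [hq2]
      have hc1 : ((n - 1 : Nat) : Int) = (n : Int) - 1 := by omega
      rw [hc1]
      by_cases q1 : pvQual ((p:Nat) : Int) <;>
        simp only [q1, Bool.false_eq_true, if_true, if_false] <;> ring

-- ---- A-side recurrence ----
lemma check_succ (N : Int) (h : 1 ≤ N) :
    check N = check (N - 1) + (if N < 100 then 1 else if condA N then 1 else 0) := by
  rw [check_eq_stepA, check_eq_stepA]
  rw [PySem.List.pyRange_one_succ_right h, List.foldl_append]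
  have : N - 1 + 1 = N := by ring
  rw [this]
  simp only [List.foldl_cons, List.foldl_nil]
  unfold stepA
  by_cases h1 : N < 100
  · simp [h1]
  · by_cases h2 : condA N <;> simp [h1, h2]

lemma exists_k (n : Nat) (h : 100 ≤ n) : ∃ k, 10 ^ (k + 2) ≤ n ∧ n < 10 ^ (k + 3) := by
  refine ⟨Nat.log 10 n - 2, ?_, ?_⟩
  · have hl : 2 ≤ Nat.log 10 n := by
      rw [Nat.le_log_iff_pow_le (by norm_num) (by omega)]
      norm_num
      omega
    have : Nat.log 10 n - 2 + 2 = Nat.log 10 n := by omega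
    rw [this]
    exact Nat.pow_log_le_self 10 (by omega)
  · have hl : 2 ≤ Nat.log 10 n := by
      rw [Nat.le_log_iff_pow_le (by norm_num) (by omega)]
      norm_num
      omega
    have : Nat.log 10 n - 2 + 3 = Nat.log 10 n + 1 := by omega
    rw [this]
    exact Nat.lt_pow_succ_log_self (by norm_num) n

lemma alt_small (m : Nat) (h : m < 100) : check_alt (m : Int) = (m : Int) := by
  unfold check_alt
  rw [if_pos (by exact_mod_cast h)]
  rcases Nat.eq_zero_or_pos m with h0 | h0
  · subst h0; norm_num
  · rw [if_pos (by exact_mod_cast h0)]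

set_option maxRecDepth 100000 in
lemma check_eq_nat : ∀ n : Nat, check (n : Int) = check_alt (n : Int) := by
  intro n
  induction n using Nat.strong_induction_on with
  | _ n ih =>
    rcases Nat.lt_or_ge n 100 with hs | hs
    · -- n < 100
      rcases Nat.eq_zero_or_pos n with h0 | h0
      · subst h0; decide
      · have h1 : (1:Int) ≤ (n : Int) := by exact_mod_cast h0
        rw [check_succ _ h1, if_pos (by exact_mod_cast hs)]
        have hc : ((n:Int) - 1) = ((n - 1 : Nat) : Int) := by omega
        rw [hc, ih (n-1) (by omega), alt_small n hs, alt_small (n-1) (by omega)]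
        omega
    · rcases Nat.eq_or_lt_of_le hs with h100 | h100
      · -- n = 100
        have hn : n = 100 := h100.symm
        subst hn
        rw [check_succ _ (by norm_num), if_neg (by norm_num)]
        rw [condA_eq 0 100 (by norm_num) (by norm_num)]
        have hc : (((100:Nat):Int) - 1) = ((99 : Nat) : Int) := by norm_num
        rw [hc, ih 99 (by norm_num), alt_small 99 (by norm_num)]
        rw [alt_closed 0 100 (by norm_num) (by norm_num)]
        norm_num
        rw [show geoSum 0 = 0 from rfl, show cnt 100 = 0 from by decide]
        norm_num
      · -- n > 100
        obtain ⟨k, hk1, hk2⟩ := exists_k n (by omega)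
        have h1 : (1:Int) ≤ (n : Int) := by exact_mod_cast Nat.one_le_iff_ne_zero.mpr (by omega)
        rw [check_succ _ h1, if_neg (by exact_mod_cast not_lt.mpr hs)]
        rw [condA_eq k n hk1 hk2]
        have hc : ((n:Int) - 1) = ((n - 1 : Nat) : Int) := by omega
        rw [hc, ih (n-1) (by omega)]
        exact (alt_step k n hk1 hk2 h100).symm

-- ===== VERDICT (by name: the statement is the Claim_ definition above) =====
theorem check_spec : Claim_equal_check := by
  unfold Claim_equal_check
  intro N _
  unfold Spec_check
  by_cases hN : 0 < N
  · have : N = ((N.toNat : Nat) : Int) := by omega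
    rw [this, check_eq_nat]
  · have hA : check N = 0 := by
      rw [check_eq_stepA]
      have : PySem.List.pyRange 1 (N + 1) = [] := by
        apply List.eq_nil_iff_forall_not_mem.mpr
        intro x hx
        rw [PySem.List.mem_pyRange_one] at hx
        omega
      rw [this]; rfl
    have hB : check_alt N = 0 := by
      unfold check_alt
      rw [if_pos (by omega), if_neg hN]
    rw [hA, hB]
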